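-- pv_equiv track=rewrite | github.com/xiongsiheng/SWAP | src/models.py | _reshape_res
-- ===== SOURCE A (Python) =====
-- def _reshape_res(prompts_ls, result):
--     '''
--     Reshape the results to the original list.
--
--     Args:
--         prompts_ls (List[List[str]]): The list of prompts.
--         result (List[str]): The list of results.
--
--     Returns:
--         original_dist (List[List[str]]): The reshaped list of results.
--     '''
--     original_dist = []
--     index = 0
--     for sublist in prompts_ls:
--         length = len(sublist)
--         original_dist.append(result[index:index + length])
--         index += length
--     return original_dist
-- ===== SOURCE B (Python) =====
-- def _reshape_res(prompts_ls, result):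
--     # Consume the flat results from a shared iterator: each element of a
--     # sublist pulls exactly one result via zip (which stops when either side
--     # is exhausted, matching slice truncation). No indices, lengths or slices.
--     it = iter(result)
--     return [[r for _, r in zip(sub, it)] for sub in prompts_ls]
-- ===== Notes on version B (the rewrite author's own statement) =====
-- stated objective: alternative
-- what changed: Replaces index arithmetic and slicing with a shared iterator over the flat results that each sublist consumes element-by-element via zip, so no offsets, lengths or slices are computed at all.
import Mathlib
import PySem

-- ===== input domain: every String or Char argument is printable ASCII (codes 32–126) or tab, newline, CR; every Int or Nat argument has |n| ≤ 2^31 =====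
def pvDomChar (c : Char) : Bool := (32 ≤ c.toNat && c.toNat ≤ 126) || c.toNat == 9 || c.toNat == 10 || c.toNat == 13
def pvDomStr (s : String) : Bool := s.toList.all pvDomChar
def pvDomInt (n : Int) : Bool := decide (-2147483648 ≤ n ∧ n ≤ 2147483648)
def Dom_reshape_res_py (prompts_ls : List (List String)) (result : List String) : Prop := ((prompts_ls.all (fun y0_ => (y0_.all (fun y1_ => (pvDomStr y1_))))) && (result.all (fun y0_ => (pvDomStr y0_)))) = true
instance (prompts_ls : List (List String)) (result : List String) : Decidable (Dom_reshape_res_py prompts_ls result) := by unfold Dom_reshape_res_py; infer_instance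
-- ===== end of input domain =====

-- B replaces A's index arithmetic and slicing by consuming the flat results element-by-element
-- from a shared stream via zip (alternative decomposition, same cost).

-- ===== PORT A =====
-- one pass: accumulator carries (original_dist, index); appends result[index:index+length]
def reshape_res_py (prompts_ls : List (List String)) (result : List String) : List (List String) :=
  (prompts_ls.foldl
    (fun (st : List (List String) × Int) sublist =>
      let length : Int := sublist.length
      (st.1 ++ [PySem.List.slice result (some st.2) (some (st.2 + length))], st.2 + length))
    ([], 0)).1

-- ===== PORT B =====
-- [r for _, r in zip(sub, it)] : pair each element of sub with one element pulled from the
-- stream; zip stops when either side ends. Returns (collected, remaining stream).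
def pvZipConsume (sub rem : List String) : List String × List String :=
  match sub, rem with
  | [], rem => ([], rem)
  | _ :: _, [] => ([], [])
  | _ :: ss, r :: rest =>
    let p := pvZipConsume ss rest
    (r :: p.1, p.2)

-- outer comprehension: each sublist consumes from the shared stream in turn
def pvReshapeGo (prompts_ls : List (List String)) (rem : List String) : List (List String) :=
  match prompts_ls with
  | [] => []
  | sub :: rest =>
    let p := pvZipConsume sub rem
    p.1 :: pvReshapeGo rest p.2

def reshape_res_py_alt (prompts_ls : List (List String)) (result : List String) : List (List String) :=
  pvReshapeGo prompts_ls result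

-- ===== PRECONDITION & SPEC =====
def Spec_reshape_res_py (prompts_ls : List (List String)) (result : List String) (out : List (List String)) : Prop := out = reshape_res_py_alt prompts_ls result
instance (prompts_ls : List (List String)) (result : List String) (out : List (List String)) : Decidable (Spec_reshape_res_py prompts_ls result out) := by unfold Spec_reshape_res_py; infer_instance

-- ===== CLAIM (what is proved, stated in full; the proofs are below) =====
def Claim_equal_reshape_res_py : Prop := ∀ (prompts_ls : List (List String)) (result : List String), Dom_reshape_res_py prompts_ls result → Spec_reshape_res_py prompts_ls result (reshape_res_py prompts_ls result)

-- ===== LEMMAS AND PROOFS =====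
theorem pvZipConsume_eq (sub : List String) : ∀ (rem : List String),
    pvZipConsume sub rem = (rem.take sub.length, rem.drop sub.length) := by
  induction sub with
  | nil => intro rem; simp [pvZipConsume]
  | cons s ss ih =>
    intro rem
    cases rem with
    | nil => simp [pvZipConsume]
    | cons r rest => simp [pvZipConsume, ih]

theorem reshape_loop_eq (result : List String) (ps : List (List String)) :
    ∀ (j : Nat) (acc : List (List String)),
      (ps.foldl
        (fun (st : List (List String) × Int) sublist =>
          let length : Int := sublist.length
          (st.1 ++ [PySem.List.slice result (some st.2) (some (st.2 + length))], st.2 + length))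
        (acc, (j : Int))).1
      = acc ++ pvReshapeGo ps (result.drop j) := by
  induction ps with
  | nil => intro j acc; simp [pvReshapeGo]
  | cons s rest ih =>
    intro j acc
    simp only [List.foldl_cons, pvReshapeGo, pvZipConsume_eq]
    have hcast : (j : Int) + (s.length : Int) = ((j + s.length : Nat) : Int) := by push_cast; ring
    rw [hcast, ih]
    simp [PySem.List.slice_natCast_add, List.drop_drop]

theorem reshape_res_py_spec : Claim_equal_reshape_res_py := by
  intro prompts_ls result _
  unfold Spec_reshape_res_py reshape_res_py reshape_res_py_alt
  have := reshape_loop_eq result prompts_ls 0 []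
  simpa using this
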